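-- pv_equiv track=rewrite | github.com/stephencummins/MaceStyle | MaceStyleValidator/ValidateDocument/ai_client.py | build_dynamic_prompt
-- ===== SOURCE A (Python) =====
-- def build_dynamic_prompt(ai_rules, document_text):
--     """Build Claude prompt dynamically from rules where UseAI=True"""
--     rules_by_type = {}
--     for rule in ai_rules:
--         rule_type = rule.get('rule_type', 'Other')
--         if rule_type not in rules_by_type:
--             rules_by_type[rule_type] = []
--         rules_by_type[rule_type].append(rule)
--
--     rules_description = []
--     for rule_type, rules in sorted(rules_by_type.items()):
--         rules_description.append(f"\n**{rule_type} Rules:**")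
--         for rule in rules:
--             title = rule.get('title', 'Unknown rule')
--             expected = rule.get('expected_value', '')
--             if expected:
--                 rules_description.append(f"- {title} (use: {expected})")
--             else:
--                 rules_description.append(f"- {title}")
--
--     return f"""You are a professional document editor applying the Mace Control Centre Writing Style Guide.
--
-- Apply ALL of the following corrections to the text:
-- {''.join(rules_description)}
--
-- Return a JSON object with two fields:
-- 1. "corrected_text": the full corrected text (preserve paragraph breaks as \\n\\n)
-- 2. "changes_made": total count of ALL changes made
--
-- Text to correct:
-- {document_text}"""
-- ===== SOURCE B (Python) =====
-- def build_dynamic_prompt(ai_rules, document_text):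
--     """Build Claude prompt dynamically from rules where UseAI=True"""
--     types = sorted({rule.get('rule_type', 'Other') for rule in ai_rules})
--     parts = []
--     for rule_type in types:
--         parts.append(f"\n**{rule_type} Rules:**")
--         for rule in ai_rules:
--             if rule.get('rule_type', 'Other') == rule_type:
--                 title = rule.get('title', 'Unknown rule')
--                 expected = rule.get('expected_value', '')
--                 parts.append(f"- {title} (use: {expected})" if expected else f"- {title}")
--     return f"""You are a professional document editor applying the Mace Control Centre Writing Style Guide.
--
-- Apply ALL of the following corrections to the text:
-- {''.join(parts)}
--
-- Return a JSON object with two fields: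
-- 1. "corrected_text": the full corrected text (preserve paragraph breaks as \\n\\n)
-- 2. "changes_made": total count of ALL changes made
--
-- Text to correct:
-- {document_text}"""
-- ===== Notes on version B (the rewrite author's own statement) =====
-- stated objective: idiomatic
-- what changed: Replaces A's dict-accumulator (group rules into rules_by_type, then sorted(items)) with sorting the distinct rule-type keys once and emitting each group by a per-type filter pass over ai_rules.
import Mathlib
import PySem

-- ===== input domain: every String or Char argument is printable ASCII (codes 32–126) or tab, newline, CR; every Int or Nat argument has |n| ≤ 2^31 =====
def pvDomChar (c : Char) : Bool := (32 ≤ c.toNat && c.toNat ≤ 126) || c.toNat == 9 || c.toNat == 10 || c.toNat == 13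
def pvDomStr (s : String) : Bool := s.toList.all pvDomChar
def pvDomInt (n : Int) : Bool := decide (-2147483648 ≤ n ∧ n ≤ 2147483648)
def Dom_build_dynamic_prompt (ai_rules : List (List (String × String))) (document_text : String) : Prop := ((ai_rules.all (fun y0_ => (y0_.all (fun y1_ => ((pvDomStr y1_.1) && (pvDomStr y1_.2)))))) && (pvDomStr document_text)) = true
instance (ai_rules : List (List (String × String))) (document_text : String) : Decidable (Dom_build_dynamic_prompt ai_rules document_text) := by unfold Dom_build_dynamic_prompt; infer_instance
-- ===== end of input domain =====

-- B replaces A's dict-accumulator-then-sorted(items) by sorted distinct type keys with a per-key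
-- filter pass over the rules (objective: idiomatic/alternative; not claimed faster).

-- ===== PORT A =====
-- rule.get(k, dflt) on the association-list rule (first match)
def pvGetRule (rule : List (String × String)) (k dflt : String) : String :=
  (PySem.Dict.mk rule).getD k dflt

def pvPromptPrefix : String :=
  "You are a professional document editor applying the Mace Control Centre Writing Style Guide.\n\nApply ALL of the following corrections to the text:\n"

def pvPromptSuffix : String :=
  "\n\nReturn a JSON object with two fields:\n1. \"corrected_text\": the full corrected text (preserve paragraph breaks as \\n\\n)\n2. \"changes_made\": total count of ALL changes made\n\nText to correct:\n"

def build_dynamic_prompt (ai_rules : List (List (String × String))) (document_text : String) : String :=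
  -- for rule in ai_rules: group into rules_by_type (insert [] on first sight, then append)
  let rules_by_type : PySem.Dict String (List (List (String × String))) :=
    ai_rules.foldl (fun d rule =>
      let rule_type := pvGetRule rule "rule_type" "Other"
      let d := if d.contains rule_type then d else d.insert rule_type []
      d.modify rule_type [] (fun l => l ++ [rule])) PySem.Dict.empty
  -- for rule_type, rules in sorted(rules_by_type.items()):  (keys are distinct, so sorting
  -- the pairs by the key alone is exact for Python's tuple comparison)
  let rules_description : List String :=
    (PySem.List.sorted rules_by_type.items (fun p => p.1) false).foldl (fun acc p =>
      let acc := acc ++ ["\n**" ++ p.1 ++ " Rules:**"]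
      p.2.foldl (fun acc rule =>
        let title := pvGetRule rule "title" "Unknown rule"
        let expected := pvGetRule rule "expected_value" ""
        if expected ≠ "" then acc ++ ["- " ++ title ++ " (use: " ++ expected ++ ")"]
        else acc ++ ["- " ++ title]) acc) []
  pvPromptPrefix ++ PySem.Str.join "" rules_description ++ pvPromptSuffix ++ document_text

-- ===== PORT B =====
def pvGetRuleB (rule : List (String × String)) (k dflt : String) : String :=
  (PySem.Dict.mk rule).getD k dflt

def build_dynamic_prompt_alt (ai_rules : List (List (String × String))) (document_text : String) : String :=
  -- types = sorted({rule.get('rule_type','Other') for rule in ai_rules})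
  let types : List String :=
    PySem.List.sorted (PySem.Set.ofList (ai_rules.map (fun r => pvGetRuleB r "rule_type" "Other"))) (fun t => t) false
  let parts : List String :=
    types.foldl (fun acc rule_type =>
      ai_rules.foldl (fun acc rule =>
        if pvGetRuleB rule "rule_type" "Other" == rule_type then
          let title := pvGetRuleB rule "title" "Unknown rule"
          let expected := pvGetRuleB rule "expected_value" ""
          acc ++ [if expected ≠ "" then "- " ++ title ++ " (use: " ++ expected ++ ")" else "- " ++ title]
        else acc) (acc ++ ["\n**" ++ rule_type ++ " Rules:**"])) []
  pvPromptPrefix ++ PySem.Str.join "" parts ++ pvPromptSuffix ++ document_text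

-- ===== PRECONDITION & SPEC =====
def Spec_build_dynamic_prompt (ai_rules : List (List (String × String))) (document_text : String) (out : String) : Prop := out = build_dynamic_prompt_alt ai_rules document_text
instance (ai_rules : List (List (String × String))) (document_text : String) (out : String) : Decidable (Spec_build_dynamic_prompt ai_rules document_text out) := by unfold Spec_build_dynamic_prompt; infer_instance

-- ===== CLAIM (what is proved, stated in full; the proofs are below) =====
def Claim_equal_build_dynamic_prompt : Prop := ∀ (ai_rules : List (List (String × String))) (document_text : String), Dom_build_dynamic_prompt ai_rules document_text → Spec_build_dynamic_prompt ai_rules document_text (build_dynamic_prompt ai_rules document_text)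

-- ===== LEMMAS AND PROOFS =====

def pvRT (r : List (String × String)) : String := pvGetRule r "rule_type" "Other"

abbrev RDict := PySem.Dict String (List (List (String × String)))

def pvStep (d : RDict) (r : List (String × String)) : RDict :=
  (if d.contains (pvRT r) then d else d.insert (pvRT r) []).modify (pvRT r) [] (fun l => l ++ [r])

theorem pvStep_getD (d : RDict) (r : List (String × String)) (t : String) :
    (pvStep d r).getD t [] = if t = pvRT r then d.getD t [] ++ [r] else d.getD t [] := by
  unfold pvStep
  by_cases hc : d.contains (pvRT r)
  · rw [if_pos hc, PySem.Dict.getD_modify]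
    split_ifs with h
    · subst h; rfl
    · rfl
  · have hc' : d.contains (pvRT r) = false := by simpa using hc
    rw [if_neg (by simp [hc']), PySem.Dict.getD_modify]
    split_ifs with h
    · subst h
      rw [PySem.Dict.getD_insert]
      simp [PySem.Dict.getD_of_not_contains _ _ hc']
    · rw [PySem.Dict.getD_insert]
      simp [h]

theorem pvFold_getD (l : List (List (String × String))) (d : RDict) (t : String) :
    (l.foldl pvStep d).getD t [] = d.getD t [] ++ l.filter (fun r => pvRT r == t) := by
  induction l generalizing d with
  | nil => simp
  | cons r l ih =>
    rw [List.foldl_cons, ih, pvStep_getD, List.filter_cons]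
    by_cases h : pvRT r = t
    · simp [h]
    · simp [h, Ne.symm h]

theorem pvStep_keys (d : RDict) (r : List (String × String)) :
    (pvStep d r).keys = PySem.Set.add d.keys (pvRT r) := by
  unfold pvStep
  by_cases hc : d.contains (pvRT r)
  · rw [if_pos hc, PySem.Dict.keys_modify, PySem.Dict.keys_insert_of_contains _ _ hc]
    have hm : pvRT r ∈ d.keys := (PySem.Dict.contains_iff_mem_keys d (pvRT r)).mp hc
    simp [PySem.Set.add, hm]
  · have hc' : d.contains (pvRT r) = false := by simpa using hc
    rw [if_neg (by simp [hc']), PySem.Dict.keys_modify,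
        PySem.Dict.keys_insert_of_contains _ _ (PySem.Dict.contains_insert_self d _ _),
        PySem.Dict.keys_insert_of_not_contains _ _ hc']
    have hm : pvRT r ∉ d.keys := by
      intro hm; exact absurd ((PySem.Dict.contains_iff_mem_keys d (pvRT r)).mpr hm) hc
    simp [PySem.Set.add, hm]

theorem pvFold_keys (l : List (List (String × String))) (d : RDict) :
    (l.foldl pvStep d).keys = PySem.Set.update d.keys (l.map pvRT) := by
  induction l generalizing d with
  | nil => simp [PySem.Set.update]
  | cons r l ih => rw [List.foldl_cons, ih, pvStep_keys]; simp [PySem.Set.update]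

theorem pvFold_keys_empty (l : List (List (String × String))) :
    (l.foldl pvStep PySem.Dict.empty).keys = PySem.Set.ofList (l.map pvRT) := by
  rw [pvFold_keys, PySem.Set.ofList_eq_foldl]
  simp [PySem.Set.update, PySem.Dict.keys_empty]

theorem pvSortedItems (D : RDict) (hnd : D.keys.Nodup) :
    PySem.List.sorted D.items (fun p => p.1) false =
      (PySem.List.sorted D.keys (fun t => t) false).map (fun t => (t, D.getD t [])) := by
  apply PySem.List.sorted_eq_of_perm_of_pairwise_lt
  · rw [PySem.Dict.items_eq_map_keys D hnd []]
    exact (PySem.List.sorted_perm D.keys (fun t => t) false).map _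
  · rw [List.pairwise_map]
    have h1 := PySem.List.sorted_pairwise D.keys (fun t => t)
    have h2 : (PySem.List.sorted D.keys (fun t => t) false).Nodup :=
      ((PySem.List.sorted_perm D.keys (fun t => t) false).nodup_iff).mpr hnd
    refine List.Pairwise.imp ?_ (h1.and h2)
    rintro a b ⟨hle, hne⟩
    exact lt_of_le_of_ne hle hne

def pvLine (rule : List (String × String)) : String :=
  let title := pvGetRule rule "title" "Unknown rule"
  let expected := pvGetRule rule "expected_value" ""
  if expected ≠ "" then "- " ++ title ++ " (use: " ++ expected ++ ")" else "- " ++ title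

theorem main_lists_eq (ai_rules : List (List (String × String))) :
    ((PySem.List.sorted (ai_rules.foldl (fun d rule =>
        let rule_type := pvGetRule rule "rule_type" "Other"
        let d := if d.contains rule_type then d else d.insert rule_type []
        d.modify rule_type [] (fun l => l ++ [rule])) PySem.Dict.empty).items (fun p => p.1) false).foldl (fun acc p =>
      let acc := acc ++ ["\n**" ++ p.1 ++ " Rules:**"]
      p.2.foldl (fun acc rule =>
        let title := pvGetRule rule "title" "Unknown rule"
        let expected := pvGetRule rule "expected_value" ""
        if expected ≠ "" then acc ++ ["- " ++ title ++ " (use: " ++ expected ++ ")"]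
        else acc ++ ["- " ++ title]) acc) []) =
    (PySem.List.sorted (PySem.Set.ofList (ai_rules.map (fun r => pvGetRuleB r "rule_type" "Other"))) (fun t => t) false).foldl (fun acc rule_type =>
      ai_rules.foldl (fun acc rule =>
        if pvGetRuleB rule "rule_type" "Other" == rule_type then
          let title := pvGetRuleB rule "title" "Unknown rule"
          let expected := pvGetRuleB rule "expected_value" ""
          acc ++ [if expected ≠ "" then "- " ++ title ++ " (use: " ++ expected ++ ")" else "- " ++ title]
        else acc) (acc ++ ["\n**" ++ rule_type ++ " Rules:**"])) [] := by
  have hD : (ai_rules.foldl (fun d rule =>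
        let rule_type := pvGetRule rule "rule_type" "Other"
        let d := if d.contains rule_type then d else d.insert rule_type []
        d.modify rule_type [] (fun l => l ++ [rule])) PySem.Dict.empty) = ai_rules.foldl pvStep PySem.Dict.empty := rfl
  rw [hD]
  set D := ai_rules.foldl pvStep PySem.Dict.empty with hDdef
  have hnd : D.keys.Nodup := by
    rw [hDdef, pvFold_keys_empty]; exact PySem.Set.nodup_ofList _
  have hinnerA : ∀ (rules : List (List (String × String))) (acc : List String),
      rules.foldl (fun acc rule =>
        let title := pvGetRule rule "title" "Unknown rule"
        let expected := pvGetRule rule "expected_value" ""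
        if expected ≠ "" then acc ++ ["- " ++ title ++ " (use: " ++ expected ++ ")"]
        else acc ++ ["- " ++ title]) acc = acc ++ rules.map pvLine := by
    intro rules acc
    have h1 := PySem.List.foldl_congr_mem rules
      (fun acc rule =>
        let title := pvGetRule rule "title" "Unknown rule"
        let expected := pvGetRule rule "expected_value" ""
        if expected ≠ "" then acc ++ ["- " ++ title ++ " (use: " ++ expected ++ ")"]
        else acc ++ ["- " ++ title])
      (fun acc rule => acc ++ [pvLine rule]) acc
      (by intro a r _; dsimp only [pvLine]; split_ifs <;> rfl)
    rw [h1]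
    exact PySem.List.foldl_append_singleton_eq_map _ _ _
  have houterA := PySem.List.foldl_congr_mem (PySem.List.sorted D.items (fun p => p.1) false)
    (fun acc p =>
      let acc := acc ++ ["\n**" ++ p.1 ++ " Rules:**"]
      p.2.foldl (fun acc rule =>
        let title := pvGetRule rule "title" "Unknown rule"
        let expected := pvGetRule rule "expected_value" ""
        if expected ≠ "" then acc ++ ["- " ++ title ++ " (use: " ++ expected ++ ")"]
        else acc ++ ["- " ++ title]) acc)
    (fun acc p => acc ++ (("\n**" ++ p.1 ++ " Rules:**") :: p.2.map pvLine))
    ([] : List String)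
    (by intro a p _; dsimp only; rw [hinnerA]; simp)
  rw [houterA, PySem.List.foldl_append_eq_flatMap]
  have hinnerB : ∀ (t : String) (acc : List String),
      ai_rules.foldl (fun acc rule =>
        if pvGetRuleB rule "rule_type" "Other" == t then
          let title := pvGetRuleB rule "title" "Unknown rule"
          let expected := pvGetRuleB rule "expected_value" ""
          acc ++ [if expected ≠ "" then "- " ++ title ++ " (use: " ++ expected ++ ")" else "- " ++ title]
        else acc) acc = acc ++ (ai_rules.filter (fun r => pvRT r == t)).map pvLine := by
    intro t acc
    have h1 := PySem.List.foldl_congr_mem ai_rules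
      (fun acc rule =>
        if pvGetRuleB rule "rule_type" "Other" == t then
          let title := pvGetRuleB rule "title" "Unknown rule"
          let expected := pvGetRuleB rule "expected_value" ""
          acc ++ [if expected ≠ "" then "- " ++ title ++ " (use: " ++ expected ++ ")" else "- " ++ title]
        else acc)
      (fun acc rule => if pvRT rule == t then acc ++ [pvLine rule] else acc) acc
      (by intro a r _; rfl)
    rw [h1]
    exact PySem.List.foldl_append_if _ _ _ _
  have houterB := PySem.List.foldl_congr_mem
    (PySem.List.sorted (PySem.Set.ofList (ai_rules.map (fun r => pvGetRuleB r "rule_type" "Other"))) (fun t => t) false)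
    (fun acc rule_type =>
      ai_rules.foldl (fun acc rule =>
        if pvGetRuleB rule "rule_type" "Other" == rule_type then
          let title := pvGetRuleB rule "title" "Unknown rule"
          let expected := pvGetRuleB rule "expected_value" ""
          acc ++ [if expected ≠ "" then "- " ++ title ++ " (use: " ++ expected ++ ")" else "- " ++ title]
        else acc) (acc ++ ["\n**" ++ rule_type ++ " Rules:**"]))
    (fun acc t => acc ++ (("\n**" ++ t ++ " Rules:**") :: (ai_rules.filter (fun r => pvRT r == t)).map pvLine))
    ([] : List String)
    (by intro a t _; dsimp only; rw [hinnerB]; simp)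
  rw [houterB, PySem.List.foldl_append_eq_flatMap]
  rw [pvSortedItems D hnd]
  have hkeys : D.keys = PySem.Set.ofList (ai_rules.map pvRT) := by
    rw [hDdef, pvFold_keys_empty]
  have hB : (ai_rules.map (fun r => pvGetRuleB r "rule_type" "Other")) = ai_rules.map pvRT := rfl
  rw [hkeys, hB]
  rw [List.flatMap_map]
  have hfun : (fun a => (("\n**" ++ (a, D.getD a []).1 ++ " Rules:**") :: List.map pvLine (a, D.getD a []).2)) =
      (fun t => ("\n**" ++ t ++ " Rules:**") :: List.map pvLine (List.filter (fun r => pvRT r == t) ai_rules)) := by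
    funext t
    dsimp only
    rw [hDdef, pvFold_getD]
    simp
  rw [hfun]

-- ===== VERDICT (by name: the statement is the Claim_ definition above) =====
theorem build_dynamic_prompt_spec : Claim_equal_build_dynamic_prompt := by
  intro ai_rules document_text _
  show pvPromptPrefix ++ PySem.Str.join ""
      ((PySem.List.sorted (ai_rules.foldl (fun d rule =>
        let rule_type := pvGetRule rule "rule_type" "Other"
        let d := if d.contains rule_type then d else d.insert rule_type []
        d.modify rule_type [] (fun l => l ++ [rule])) PySem.Dict.empty).items (fun p => p.1) false).foldl (fun acc p =>
      let acc := acc ++ ["\n**" ++ p.1 ++ " Rules:**"]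
      p.2.foldl (fun acc rule =>
        let title := pvGetRule rule "title" "Unknown rule"
        let expected := pvGetRule rule "expected_value" ""
        if expected ≠ "" then acc ++ ["- " ++ title ++ " (use: " ++ expected ++ ")"]
        else acc ++ ["- " ++ title]) acc) []) ++ pvPromptSuffix ++ document_text =
    pvPromptPrefix ++ PySem.Str.join ""
      ((PySem.List.sorted (PySem.Set.ofList (ai_rules.map (fun r => pvGetRuleB r "rule_type" "Other"))) (fun t => t) false).foldl (fun acc rule_type =>
      ai_rules.foldl (fun acc rule =>
        if pvGetRuleB rule "rule_type" "Other" == rule_type then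
          let title := pvGetRuleB rule "title" "Unknown rule"
          let expected := pvGetRuleB rule "expected_value" ""
          acc ++ [if expected ≠ "" then "- " ++ title ++ " (use: " ++ expected ++ ")" else "- " ++ title]
        else acc) (acc ++ ["\n**" ++ rule_type ++ " Rules:**"])) []) ++ pvPromptSuffix ++ document_text
  rw [main_lists_eq]
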